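-- pv_equiv track=rewrite | github.com/MiladyEmily/leetcode_tasks | february24.py | get_end_sequential
-- ===== SOURCE A (Python) =====
-- def get_end_sequential(start):
--     start = str(start)
--     current = ord(start[0])
--     start_digit = current - ord('1') + 1
--     if start_digit - 1 + len(start) > 9:
--         return 10 - len(start), 0
--     for char in start:
--         if ord(char) == current:
--             current += 1
--             continue
--         if ord(char) < current:
--             if start_digit == 1:
--                 return 10 - len(start) + 1, -1
--             if start_digit - 1 + len(start) > 9:
--                 return 10 - len(start), 0
--             return start_digit - 1, 0
--         break
--     return start_digit, 0
-- ===== SOURCE B (Python) =====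
-- def get_end_sequential(start):
--     # build the ideal consecutive-code template and use Python's lexicographic
--     # string comparison instead of a char-by-char scan with a running counter
--     s = str(start)
--     d = ord(s[0]) - 48
--     L = len(s)
--     if d - 1 + L > 9:
--         return 10 - L, 0
--     template = ''.join(map(chr, range(ord(s[0]), ord(s[0]) + L)))
--     if s < template:
--         return (11 - L, -1) if d == 1 else (d - 1, 0)
--     return d, 0
-- ===== Notes on version B (the rewrite author's own statement) =====
-- stated objective: alternative
-- what changed: B replaces A's fused char-by-char scan with a mutating counter and early returns by generating the ideal consecutive-code template string and deciding everything from one lexicographic string comparison s < template (equal length makes Python's < report exactly 'first mismatching char is smaller', the only case A distinguishes).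
import Mathlib
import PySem

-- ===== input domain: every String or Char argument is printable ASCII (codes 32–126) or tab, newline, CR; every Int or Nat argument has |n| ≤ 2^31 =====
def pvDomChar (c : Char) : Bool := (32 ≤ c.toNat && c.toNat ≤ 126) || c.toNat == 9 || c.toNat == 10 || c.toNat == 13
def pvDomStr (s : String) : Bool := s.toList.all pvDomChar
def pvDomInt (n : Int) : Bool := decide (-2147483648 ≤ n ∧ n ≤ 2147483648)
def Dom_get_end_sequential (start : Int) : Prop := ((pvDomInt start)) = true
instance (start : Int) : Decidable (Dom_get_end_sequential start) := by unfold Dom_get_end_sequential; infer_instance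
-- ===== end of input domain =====

-- B generates the ideal consecutive-code template and decides by one lexicographic
-- string comparison instead of A's char-by-char scan; same cost, different mechanism.

-- ===== PORT A =====
-- A's for-loop with its early returns, step for step (headD guard only makes it total;
-- str(start) is never empty)
def getEndLoopA (chars : List Char) (current start_digit L : Int) : Int × Int :=
  match chars with
  | [] => (start_digit, 0)
  | c :: rest =>
      if (c.toNat : Int) = current then getEndLoopA rest (current + 1) start_digit L
      else if (c.toNat : Int) < current then
        if start_digit = 1 then (10 - L + 1, -1)
        else if start_digit - 1 + L > 9 then (10 - L, 0)
        else (start_digit - 1, 0)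
      else (start_digit, 0)

def get_end_sequential (start : Int) : Int × Int :=
  let s := (PySem.Int.toStr start).toList
  let current : Int := (s.headD '0').toNat
  let start_digit : Int := current - 49 + 1
  let L : Int := s.length
  if start_digit - 1 + L > 9 then (10 - L, 0)
  else getEndLoopA s current start_digit L

-- ===== PORT B =====
-- ''.join(map(chr, range(c0, c0 + L))): the template string, represented by its list
-- of code points (a Python str IS its code-point sequence, so this is exact)
def mkTemplateB (n : Nat) (code : Int) : List Int :=
  match n with
  | 0 => []
  | n + 1 => code :: mkTemplateB n (code + 1)

-- Python's  s < template : lexicographic code-point comparison of equal-or-any-length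
-- sequences (exact port of str '<' over the template's code points)
def pyStrLtCodes (s : List Char) (t : List Int) : Bool :=
  match s, t with
  | [], [] => false
  | [], _ :: _ => true
  | _ :: _, [] => false
  | a :: as, b :: bs =>
      if (a.toNat : Int) < b then true
      else if b < (a.toNat : Int) then false
      else pyStrLtCodes as bs

def get_end_sequential_alt (start : Int) : Int × Int :=
  let s := (PySem.Int.toStr start).toList
  let c0 : Int := (s.headD '0').toNat
  let d : Int := c0 - 48
  let L : Int := s.length
  if d - 1 + L > 9 then (10 - L, 0)
  else if pyStrLtCodes s (mkTemplateB s.length c0) then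
    (if d = 1 then (11 - L, -1) else (d - 1, 0))
  else (d, 0)

-- ===== PRECONDITION & SPEC =====
def Spec_get_end_sequential (start : Int) (out : Int × Int) : Prop := out = get_end_sequential_alt start
instance (start : Int) (out : Int × Int) : Decidable (Spec_get_end_sequential start out) := by unfold Spec_get_end_sequential; infer_instance

-- ===== CLAIM (what is proved, stated in full; the proofs are below) =====
def Claim_equal_get_end_sequential : Prop := ∀ (start : Int), Dom_get_end_sequential start → Spec_get_end_sequential start (get_end_sequential start)

-- ===== LEMMAS AND PROOFS =====
-- A's scan against the running counter is the lexicographic comparison with the template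
theorem getEndLoopA_lt_template (chars : List Char) (expect sd L : Int)
    (h : ¬ sd - 1 + L > 9) :
    getEndLoopA chars expect sd L =
      if pyStrLtCodes chars (mkTemplateB chars.length expect) then
        (if sd = 1 then (10 - L + 1, -1) else (sd - 1, 0))
      else (sd, 0) := by
  induction chars generalizing expect with
  | nil => simp [getEndLoopA, mkTemplateB, pyStrLtCodes]
  | cons c rest ih =>
      simp only [getEndLoopA, List.length_cons, mkTemplateB, pyStrLtCodes]
      by_cases h1 : (c.toNat : Int) = expect
      · have h2 : ¬ (c.toNat : Int) < expect := by omega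
        simp [h1, ih]
      · by_cases h2 : (c.toNat : Int) < expect
        · simp [h1, h2, h]
        · have h3 : expect < (c.toNat : Int) := by omega
          simp [h1, h2, h3]

-- ===== VERDICT (by name: the statement is the Claim_ definition above) =====
theorem get_end_sequential_spec : Claim_equal_get_end_sequential := by
  intro start _
  show get_end_sequential start = get_end_sequential_alt start
  simp only [get_end_sequential, get_end_sequential_alt]
  generalize (PySem.Int.toStr start).toList = s
  generalize ((s.headD '0').toNat : Int) = c
  by_cases hg : c - 49 + 1 - 1 + (s.length : Int) > 9
  · have hg' : c - 48 - 1 + (s.length : Int) > 9 := by omega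
    rw [if_pos hg, if_pos hg']
  · have hg' : ¬ c - 48 - 1 + (s.length : Int) > 9 := by omega
    rw [if_neg hg, if_neg hg',
      getEndLoopA_lt_template s c (c - 49 + 1) (s.length : Int) (by omega)]
    by_cases hlt : pyStrLtCodes s (mkTemplateB s.length c) = true
    · rw [if_pos hlt, if_pos hlt]
      by_cases h1 : c - 49 + 1 = 1
      · have h2 : c - 48 = 1 := by omega
        simp [h1, h2, Prod.ext_iff]; omega
      · have h2 : ¬ c - 48 = 1 := by omega
        simp [h1, h2, Prod.ext_iff]; omega
    · rw [if_neg hlt, if_neg hlt]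
      simp [Prod.ext_iff]; omega
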